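-- pv_equiv track=rewrite | github.com/CDDLeiden/3ddpd | src/md_3ddpd/StructBindingPocket.py | unique_binding_residues
-- ===== SOURCE A (Python) =====
-- import itertools
--
-- def unique_binding_residues(binding_pocket_target):
--     """
--     Extract unique binding residues from different PDB codes for one target
--     """
--     interacting_aas_target = []
--
--     for pdb_code, interacting_aas in binding_pocket_target.items():
--         for interacting_aa in interacting_aas:
--             seq_number = interacting_aa[0]
--             aa = interacting_aa[1]
--             # Append only sequence number and AA, not PDB code
--             interacting_aas_target.append([seq_number, aa])
--
--     # Remove duplicates in nested list
--     interacting_aas_target.sort()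
--     interacting_aas_target_unique = list(l for l, _ in itertools.groupby(interacting_aas_target))
--
--     return interacting_aas_target_unique
-- ===== SOURCE B (Python) =====
-- def unique_binding_residues(binding_pocket_target):
--     """
--     Extract unique binding residues from different PDB codes for one target
--     """
--     # Hash-based dedup over (seq_number, aa) tuples, one sort at the end.
--     seen = {(interacting_aa[0], interacting_aa[1])
--             for interacting_aas in binding_pocket_target.values()
--             for interacting_aa in interacting_aas}
--     return [[seq_number, aa] for seq_number, aa in sorted(seen)]
-- ===== Notes on version B (the rewrite author's own statement) =====
-- stated objective: idiomatic
-- what changed: Replaces the append-all/sort/itertools.groupby adjacent-dedup pipeline with a set comprehension that deduplicates (seq_number, aa) tuples by hashing, followed by a single sort and a tuple-to-list conversion.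
import Mathlib
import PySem

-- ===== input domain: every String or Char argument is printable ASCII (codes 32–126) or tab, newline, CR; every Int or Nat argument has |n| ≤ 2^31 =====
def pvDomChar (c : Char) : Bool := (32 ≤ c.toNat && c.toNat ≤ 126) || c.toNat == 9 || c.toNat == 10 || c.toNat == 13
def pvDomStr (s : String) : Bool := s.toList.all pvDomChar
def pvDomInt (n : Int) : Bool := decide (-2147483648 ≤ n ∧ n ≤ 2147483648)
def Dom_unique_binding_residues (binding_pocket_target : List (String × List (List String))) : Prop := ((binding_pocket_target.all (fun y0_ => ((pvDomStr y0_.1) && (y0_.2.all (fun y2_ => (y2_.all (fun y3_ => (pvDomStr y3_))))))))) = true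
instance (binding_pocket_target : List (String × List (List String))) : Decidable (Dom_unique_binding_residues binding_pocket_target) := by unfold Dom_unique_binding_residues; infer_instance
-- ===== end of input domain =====

-- B replaces A's append-all / sort / itertools.groupby adjacent-dedup with a set of
-- (seq_number, aa) tuples deduplicated by hashing and one final sort (objective: idiomatic).

-- ===== PORT A =====
-- hand port of `list(l for l, _ in itertools.groupby(xs))`: keeps the first element of
-- every run of equal adjacent elements (exact for groupby with no key function)
def pvGroupbyFirsts : List (List String) → List (List String)
  | [] => []
  | x :: xs =>
    match xs with
    | [] => [x]
    | y :: t => if x = y then pvGroupbyFirsts (y :: t) else x :: pvGroupbyFirsts (y :: t)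

def unique_binding_residues (binding_pocket_target : List (String × List (List String))) : List (List String) :=
  let interacting_aas_target : List (List String) :=
    binding_pocket_target.foldl (fun acc kv =>
      kv.2.foldl (fun acc2 interacting_aa =>
        acc2 ++ [[PySem.List.pyGetD interacting_aa 0 "", PySem.List.pyGetD interacting_aa 1 ""]]) acc) []
  -- interacting_aas_target.sort(): Python compares lists of strings lexicographically,
  -- which is exactly Lean's `<` on List String (List.Lex over String `<`)
  let sortedList := PySem.List.sorted interacting_aas_target (fun l => l)
  pvGroupbyFirsts sortedList

-- ===== PORT B =====
def unique_binding_residues_alt (binding_pocket_target : List (String × List (List String))) : List (List String) :=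
  -- set comprehension: the set of the generated tuples, first occurrences in generation order
  let seen : PySem.Set (String × String) :=
    PySem.Set.ofList (binding_pocket_target.flatMap (fun kv =>
      kv.2.map (fun interacting_aa =>
        (PySem.List.pyGetD interacting_aa 0 "", PySem.List.pyGetD interacting_aa 1 ""))))
  -- sorted(seen): tuples compare lexicographically component-wise
  (PySem.List.sorted2 seen Prod.fst Prod.snd).map (fun p => [p.1, p.2])

-- ===== PRECONDITION & SPEC =====
-- Pre_ excludes inner residue lists shorter than 2, on which A raises IndexError at
-- interacting_aa[1], and association lists with a repeated key, which represent no
-- Python dict (a dict cannot hold a duplicate key), so A is never given them.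
def Pre_unique_binding_residues (binding_pocket_target : List (String × List (List String))) : Prop :=
  (∀ kv ∈ binding_pocket_target, ∀ ia ∈ kv.2, 2 ≤ ia.length) ∧
  (binding_pocket_target.map Prod.fst).Nodup
instance (binding_pocket_target : List (String × List (List String))) : Decidable (Pre_unique_binding_residues binding_pocket_target) := by unfold Pre_unique_binding_residues; infer_instance

def pvWitness_unique_binding_residues : (List (String × List (List String))) :=
  [("1abc", [["12", "ALA"], ["12", "ALA"], ["5", "GLY"]]), ("2xyz", [["5", "GLY"]])]

def Spec_unique_binding_residues (binding_pocket_target : List (String × List (List String))) (out : List (List String)) : Prop := out = unique_binding_residues_alt binding_pocket_target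
instance (binding_pocket_target : List (String × List (List String))) (out : List (List String)) : Decidable (Spec_unique_binding_residues binding_pocket_target out) := by unfold Spec_unique_binding_residues; infer_instance

-- ===== CLAIM (what is proved, stated in full; the proofs are below) =====
def Claim_equal_unique_binding_residues : Prop := ∀ (binding_pocket_target : List (String × List (List String))), Dom_unique_binding_residues binding_pocket_target → Pre_unique_binding_residues binding_pocket_target → Spec_unique_binding_residues binding_pocket_target (unique_binding_residues binding_pocket_target)

-- ===== LEMMAS AND PROOFS =====

def pvPair (ia : List String) : String × String :=
  (PySem.List.pyGetD ia 0 "", PySem.List.pyGetD ia 1 "")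
def pvF (p : String × String) : List String := [p.1, p.2]
def pvRlt (p q : String × String) : Prop := p.1 < q.1 ∨ (p.1 = q.1 ∧ p.2 < q.2)
def pvRle (p q : String × String) : Prop := pvRlt p q ∨ p = q
def pvBf2 (a b : String × String) : Bool :=
  decide (a.1 < b.1) || (!decide (b.1 < a.1) && decide (a.2 < b.2))

def pvDedupP : List (String × String) → List (String × String)
  | [] => []
  | x :: xs =>
    match xs with
    | [] => [x]
    | y :: t => if x = y then pvDedupP (y :: t) else x :: pvDedupP (y :: t)

theorem pvCmp (x y : String × String) :
    decide (([x.1, x.2] : List String) < [y.1, y.2]) = pvBf2 x y := by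
  rcases lt_trichotomy x.1 y.1 with h | h | h
  · simp [pvBf2, List.cons_lt_cons_iff, h]
  · simp [pvBf2, List.cons_lt_cons_iff, h]
  · simp [pvBf2, List.cons_lt_cons_iff, h, lt_asymm h, h.ne']

theorem pvMapInsertBy (x : String × String) (l : List (String × String)) :
    PySem.List.insertBy (fun a b => decide (a < b)) (pvF x) (l.map pvF) =
      (PySem.List.insertBy pvBf2 x l).map pvF := by
  induction l with
  | nil => simp [PySem.List.insertBy]
  | cons y ys ih =>
    simp only [List.map_cons, PySem.List.insertBy]
    have h : decide ((pvF x : List String) < pvF y) = pvBf2 x y := pvCmp x y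
    rw [show (pvF x : List String) = [x.1, x.2] from rfl] at h ⊢
    rw [show (pvF y : List String) = [y.1, y.2] from rfl] at h ⊢
    by_cases hb : pvBf2 x y = true
    · simp [h, hb, pvF]
    · simp only [Bool.not_eq_true] at hb
      simp [h, hb, pvF]
      exact ih

theorem pvMapFold (P : List (String × String)) :
    ∀ acc, List.foldl (fun acc x => PySem.List.insertBy (fun a b => decide (a < b)) x acc)
        (acc.map pvF) (P.map pvF) =
      (List.foldl (fun acc x => PySem.List.insertBy pvBf2 x acc) acc P).map pvF := by
  induction P with
  | nil => intro acc; simp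
  | cons p ps ih =>
    intro acc
    simp only [List.map_cons, List.foldl_cons]
    rw [pvMapInsertBy, ih]

theorem pvSortedEq (P : List (String × String)) :
    PySem.List.sorted (P.map pvF) (fun l => l) = (PySem.List.sorted2 P Prod.fst Prod.snd).map pvF := by
  rw [PySem.List.sorted_eq_foldl_insertBy]
  show _ = (PySem.List.sorted2 P Prod.fst Prod.snd).map pvF
  have h2 : PySem.List.sorted2 P Prod.fst Prod.snd =
      List.foldl (fun acc x => PySem.List.insertBy pvBf2 x acc) [] P := rfl
  rw [h2, ← pvMapFold P []]
  rfl

theorem pvRlt_trans {a b c : String × String} (h1 : pvRlt a b) (h2 : pvRlt b c) : pvRlt a c := by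
  rcases h1 with h1 | ⟨e1, h1⟩ <;> rcases h2 with h2 | ⟨e2, h2⟩
  · exact Or.inl (h1.trans h2)
  · exact Or.inl (e2 ▸ h1)
  · exact Or.inl (e1 ▸ h2)
  · exact Or.inr ⟨e1.trans e2, h1.trans h2⟩

theorem pvRlt_asymm {a b : String × String} (h1 : pvRlt a b) (h2 : pvRlt b a) : False := by
  rcases h1 with h1 | ⟨e1, h1⟩ <;> rcases h2 with h2 | ⟨e2, h2⟩
  · exact absurd h2 (lt_asymm h1)
  · exact absurd h1 (e2 ▸ lt_irrefl _)
  · exact absurd h2 (e1 ▸ lt_irrefl _)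
  · exact absurd h2 (lt_asymm h1)

theorem pvRlt_ne {a b : String × String} (h : pvRlt a b) : a ≠ b := by
  intro e; exact pvRlt_asymm h (e ▸ h)

theorem pvRle_antisymm {a b : String × String} (h1 : pvRle a b) (h2 : pvRle b a) : a = b := by
  rcases h1 with h1 | rfl
  · rcases h2 with h2 | e
    · exact absurd h2 (fun h2 => pvRlt_asymm h1 h2)
    · exact e.symm
  · rfl

theorem pvRlt_of_rlt_of_rle {a b c : String × String} (h1 : pvRlt a b) (h2 : pvRle b c) : pvRlt a c := by
  rcases h2 with h2 | rfl
  · exact pvRlt_trans h1 h2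
  · exact h1

theorem pvBf2_true {a b : String × String} (h : pvBf2 a b = true) : pvRlt a b := by
  simp only [pvBf2, Bool.or_eq_true, Bool.and_eq_true, Bool.not_eq_true', decide_eq_true_eq,
    decide_eq_false_iff_not] at h
  rcases h with h | ⟨h1, h2⟩
  · exact Or.inl h
  · rcases (le_of_not_gt h1).lt_or_eq with h3 | h3
    · exact Or.inl h3
    · exact Or.inr ⟨h3, h2⟩

theorem pvBf2_false {a b : String × String} (h : pvBf2 a b = false) : pvRle b a := by
  simp only [pvBf2, Bool.or_eq_false_iff, Bool.and_eq_false_iff, Bool.not_eq_false',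
    decide_eq_true_eq, decide_eq_false_iff_not] at h
  rcases h with ⟨h1, h2 | h2⟩
  · exact Or.inl (Or.inl h2)
  · rcases (le_of_not_gt h1).lt_or_eq with h3 | h3
    · exact Or.inl (Or.inl h3)
    · rcases (le_of_not_gt h2).lt_or_eq with h4 | h4
      · exact Or.inl (Or.inr ⟨h3, h4⟩)
      · exact Or.inr (Prod.ext h3 h4)

theorem pvInsertByPairwise (x : String × String) :
    ∀ l : List (String × String), List.Pairwise pvRle l →
      List.Pairwise pvRle (PySem.List.insertBy pvBf2 x l) := by
  intro l
  induction l with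
  | nil => intro _; simp [PySem.List.insertBy]
  | cons y ys ih =>
    intro hp
    rw [List.pairwise_cons] at hp
    obtain ⟨hy, hys⟩ := hp
    show List.Pairwise pvRle (if pvBf2 x y = true then x :: y :: ys else y :: PySem.List.insertBy pvBf2 x ys)
    by_cases hb : pvBf2 x y = true
    · rw [if_pos hb]
      have hxy : pvRlt x y := pvBf2_true hb
      refine List.Pairwise.cons ?_ (List.Pairwise.cons hy hys)
      intro z hz
      rcases hz with _ | hz
      · exact Or.inl hxy
      · exact Or.inl (pvRlt_of_rlt_of_rle hxy (hy _ (by assumption)))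
    · rw [if_neg hb]
      have hyx : pvRle x y → True := fun _ => trivial
      refine List.Pairwise.cons ?_ (ih hys)
      intro z hz
      rw [PySem.List.mem_insertBy] at hz
      rcases hz with rfl | hz
      · exact pvBf2_false (by simpa using hb)
      · exact hy _ hz

theorem pvSorted2Pairwise (P : List (String × String)) :
    List.Pairwise pvRle (PySem.List.sorted2 P Prod.fst Prod.snd) := by
  have h : ∀ (Q : List (String × String)) (acc : List (String × String)),
      List.Pairwise pvRle acc →
      List.Pairwise pvRle (List.foldl (fun acc x => PySem.List.insertBy pvBf2 x acc) acc Q) := by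
    intro Q
    induction Q with
    | nil => intro acc h; exact h
    | cons q qs ih => intro acc h; exact ih _ (pvInsertByPairwise q acc h)
  exact h P [] List.Pairwise.nil

theorem pvMemDedupP : ∀ (l : List (String × String)) (z : String × String),
    z ∈ pvDedupP l ↔ z ∈ l
  | [] , z => by simp [pvDedupP]
  | [x], z => by simp [pvDedupP]
  | x :: y :: t, z => by
    rw [show pvDedupP (x :: y :: t) = if x = y then pvDedupP (y :: t) else x :: pvDedupP (y :: t) from rfl]
    by_cases h : x = y
    · subst h; rw [if_pos rfl, pvMemDedupP (x :: t) z]; simp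
    · rw [if_neg h]; simp [pvMemDedupP (y :: t) z]

theorem pvDedupPPairwiseLt : ∀ l : List (String × String), List.Pairwise pvRle l →
    List.Pairwise pvRlt (pvDedupP l)
  | [] => by intro _; simp [pvDedupP]
  | [x] => by intro _; simp [pvDedupP]
  | x :: y :: t => by
    intro hp
    rw [List.pairwise_cons] at hp
    obtain ⟨hx, hp'⟩ := hp
    rw [show pvDedupP (x :: y :: t) = if x = y then pvDedupP (y :: t) else x :: pvDedupP (y :: t) from rfl]
    by_cases h : x = y
    · rw [if_pos h]; exact pvDedupPPairwiseLt (y :: t) hp'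
    · rw [if_neg h]
      refine List.Pairwise.cons ?_ (pvDedupPPairwiseLt (y :: t) hp')
      intro z hz
      rw [pvMemDedupP] at hz
      have hxz : pvRle x z := hx _ hz
      rcases hxz with hlt | heq
      · exact hlt
      · -- z = x appears later in y :: t: contradiction with Pairwise pvRle and x ≠ y
        exfalso
        subst heq
        rcases List.mem_cons.mp hz with hz1 | hz2
        · exact h hz1
        · have h1 : pvRle x y := hx _ List.mem_cons_self
          have h2 : pvRle y x := (List.pairwise_cons.mp hp').1 _ hz2
          exact h (pvRle_antisymm h1 h2)

theorem pvDedupPSublist : ∀ l : List (String × String), (pvDedupP l).Sublist l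
  | [] => by simp [pvDedupP]
  | [x] => by simp [pvDedupP]
  | x :: y :: t => by
    rw [show pvDedupP (x :: y :: t) = if x = y then pvDedupP (y :: t) else x :: pvDedupP (y :: t) from rfl]
    by_cases h : x = y
    · rw [if_pos h]; exact (pvDedupPSublist (y :: t)).cons _
    · rw [if_neg h]; exact (pvDedupPSublist (y :: t)).cons₂ _

theorem pvGroupbyMap : ∀ l : List (String × String),
    pvGroupbyFirsts (l.map pvF) = (pvDedupP l).map pvF
  | [] => rfl
  | [x] => rfl
  | x :: y :: t => by
    have hinj : (pvF x = pvF y) ↔ x = y := by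
      constructor
      · intro h; simp only [pvF, List.cons.injEq, and_true] at h; exact Prod.ext h.1 h.2
      · intro h; rw [h]
    rw [show (x :: y :: t).map pvF = pvF x :: pvF y :: t.map pvF from rfl]
    rw [show pvGroupbyFirsts (pvF x :: pvF y :: t.map pvF) =
      if pvF x = pvF y then pvGroupbyFirsts (pvF y :: t.map pvF)
      else pvF x :: pvGroupbyFirsts (pvF y :: t.map pvF) from rfl]
    rw [show pvDedupP (x :: y :: t) = if x = y then pvDedupP (y :: t) else x :: pvDedupP (y :: t) from rfl]
    by_cases h : x = y
    · rw [if_pos (hinj.mpr h), if_pos h, show (pvF y :: t.map pvF) = (y :: t).map pvF from rfl,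
        pvGroupbyMap (y :: t)]
    · rw [if_neg (fun hc => h (hinj.mp hc)), if_neg h, show (pvF y :: t.map pvF) = (y :: t).map pvF from rfl,
        pvGroupbyMap (y :: t), List.map_cons]

theorem pvAFlat (bpt : List (String × List (List String))) :
    ∀ acc : List (List String),
    bpt.foldl (fun acc kv =>
      kv.2.foldl (fun acc2 ia => acc2 ++ [pvF (pvPair ia)]) acc) acc =
    acc ++ (bpt.flatMap (fun kv => kv.2.map (fun ia => pvF (pvPair ia)))) := by
  induction bpt with
  | nil => intro acc; simp
  | cons kv rest ih =>
    intro acc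
    simp only [List.foldl_cons, List.flatMap_cons]
    rw [PySem.List.foldl_append_eq_flatMap (fun ia => [pvF (pvPair ia)]) kv.2 acc, ih,
      ← List.map_eq_flatMap, List.append_assoc]

-- the central equality on pair lists
theorem pvDedupSorted (P : List (String × String)) :
    pvDedupP (PySem.List.sorted2 P Prod.fst Prod.snd) =
      PySem.List.sorted2 (PySem.Set.ofList P) Prod.fst Prod.snd := by
  have hL : List.Pairwise pvRlt (pvDedupP (PySem.List.sorted2 P Prod.fst Prod.snd)) :=
    pvDedupPPairwiseLt _ (pvSorted2Pairwise P)
  have hRle : List.Pairwise pvRle (PySem.List.sorted2 (PySem.Set.ofList P) Prod.fst Prod.snd) :=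
    pvSorted2Pairwise _
  have hRnodup : (PySem.List.sorted2 (PySem.Set.ofList P) Prod.fst Prod.snd).Nodup :=
    ((PySem.List.sorted2_perm (PySem.Set.ofList P) Prod.fst Prod.snd false).nodup_iff).mpr
      (PySem.Set.nodup_ofList P)
  have hR : List.Pairwise pvRlt (PySem.List.sorted2 (PySem.Set.ofList P) Prod.fst Prod.snd) := by
    have hand := hRle.and hRnodup
    refine hand.imp ?_
    intro a b hab
    rcases hab.1 with h | h
    · exact h
    · exact absurd h hab.2
  have hLnodup : (pvDedupP (PySem.List.sorted2 P Prod.fst Prod.snd)).Nodup :=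
    hL.imp pvRlt_ne
  have hmem : ∀ z, z ∈ pvDedupP (PySem.List.sorted2 P Prod.fst Prod.snd) ↔
      z ∈ PySem.List.sorted2 (PySem.Set.ofList P) Prod.fst Prod.snd := by
    intro z
    rw [pvMemDedupP, (PySem.List.sorted2_perm P Prod.fst Prod.snd false).mem_iff,
      (PySem.List.sorted2_perm (PySem.Set.ofList P) Prod.fst Prod.snd false).mem_iff,
      PySem.Set.mem_ofList]
  have hperm : (pvDedupP (PySem.List.sorted2 P Prod.fst Prod.snd)).Perm
      (PySem.List.sorted2 (PySem.Set.ofList P) Prod.fst Prod.snd) :=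
    (List.perm_ext_iff_of_nodup hLnodup hRnodup).mpr hmem
  exact List.Perm.eq_of_pairwise
    (fun a b _ _ h1 h2 => absurd h2 (fun h2 => pvRlt_asymm h1 h2)) hL hR hperm

theorem pvMain (bpt : List (String × List (List String))) :
    unique_binding_residues bpt = unique_binding_residues_alt bpt := by
  show pvGroupbyFirsts (PySem.List.sorted
      (bpt.foldl (fun acc kv => kv.2.foldl (fun a ia => a ++ [pvF (pvPair ia)]) acc) [])
      (fun l => l)) =
    (PySem.List.sorted2 (PySem.Set.ofList (bpt.flatMap (fun kv => kv.2.map pvPair)))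
      Prod.fst Prod.snd).map pvF
  rw [pvAFlat bpt [], List.nil_append]
  have hP : bpt.flatMap (fun kv => kv.2.map (fun ia => pvF (pvPair ia))) =
      (bpt.flatMap (fun kv => kv.2.map pvPair)).map pvF := by
    simp [List.map_flatMap, List.map_map, Function.comp_def]
  rw [hP, pvSortedEq, pvGroupbyMap, pvDedupSorted]

-- ===== VERDICT (by name: the statement is the Claim_ definition above) =====
theorem unique_binding_residues_spec : Claim_equal_unique_binding_residues := by
  intro bpt _ _
  unfold Spec_unique_binding_residues
  exact pvMain bpt
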